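-- pv_equiv track=rewrite | github.com/TaeHongGil/project | python/3.py | solution
-- ===== SOURCE A (Python) =====
-- def solution(a):
--     answer = []
--
--     if(len(a)==1):
--         return 1
--     min_num = a[0]
--     for i in range(1,len(a)-1):
--         if(min_num > a[i]):
--             min_num = a[i]
--             answer.append(a[i])
--
--     min_num=a[-1]
--     for i in range(len(a)-2,0,-1):
--         if(min_num > a[i]):
--             min_num = a[i]
--             answer.append(a[i])
--
--     return len(set(answer))+2
-- ===== SOURCE B (Python) =====
-- def solution(a):
--     if len(a) == 1:
--         return 1
--     # prefix minima: pre[k] = min(a[0..k])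
--     pre = [a[0]]
--     for x in a[1:]:
--         pre.append(min(pre[-1], x))
--     # suffix minima: suf[k] = min(a[k..n-1])
--     suf = [a[-1]]
--     for x in reversed(a[:-1]):
--         suf.append(min(suf[-1], x))
--     suf.reverse()
--     picked = {a[i] for i in range(1, len(a) - 1)
--               if a[i] < pre[i - 1] or a[i] < suf[i + 1]}
--     return len(picked) + 2
-- ===== Notes on version B (the rewrite author's own statement) =====
-- stated objective: alternative
-- what changed: A detects new running minima with two stateful scans mutating min_num and appending to a shared list; B precomputes prefix-min and suffix-min arrays and collects interior elements below the neighbouring array entry into a set comprehension in one index pass.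
import Mathlib
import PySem

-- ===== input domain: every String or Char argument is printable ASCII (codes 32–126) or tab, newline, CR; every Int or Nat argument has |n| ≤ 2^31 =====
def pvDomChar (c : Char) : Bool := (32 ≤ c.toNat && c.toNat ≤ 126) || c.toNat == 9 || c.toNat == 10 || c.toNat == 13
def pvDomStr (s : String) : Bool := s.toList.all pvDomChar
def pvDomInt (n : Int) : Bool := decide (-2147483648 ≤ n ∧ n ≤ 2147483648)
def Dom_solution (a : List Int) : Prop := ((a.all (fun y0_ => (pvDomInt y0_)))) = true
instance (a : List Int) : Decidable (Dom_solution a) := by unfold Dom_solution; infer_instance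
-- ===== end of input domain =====

-- B replaces A's two stateful running-minimum scans by prefix-/suffix-minimum arrays and a
-- set comprehension over interior indices; same return value, no speed claim.

-- ===== PORT A =====
def solution (a : List Int) : Int :=
  if a.length == 1 then 1
  else
    let n : Int := a.length
    let st1 := (PySem.List.pyRange 1 (n - 1) 1).foldl
      (fun (st : Int × List Int) i =>
        if st.1 > PySem.List.pyGetD a i 0 then
          (PySem.List.pyGetD a i 0, st.2 ++ [PySem.List.pyGetD a i 0])
        else st)
      (PySem.List.pyGetD a 0 0, [])
    let st2 := (PySem.List.pyRange (n - 2) 0 (-1)).foldl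
      (fun (st : Int × List Int) i =>
        if st.1 > PySem.List.pyGetD a i 0 then
          (PySem.List.pyGetD a i 0, st.2 ++ [PySem.List.pyGetD a i 0])
        else st)
      (PySem.List.pyGetD a (-1) 0, st1.2)
    ((PySem.Set.ofList st2.2).length : Int) + 2

-- ===== PORT B =====
def solution_alt (a : List Int) : Int :=
  if a.length == 1 then 1
  else
    let pre := (PySem.List.slice a (some 1) none).foldl
      (fun p x => p ++ [min (PySem.List.pyGetD p (-1) 0) x]) [PySem.List.pyGetD a 0 0]
    let suf := ((PySem.List.slice a none (some (-1))).reverse.foldl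
      (fun p x => p ++ [min (PySem.List.pyGetD p (-1) 0) x]) [PySem.List.pyGetD a (-1) 0]).reverse
    let picked := (PySem.List.pyRange 1 ((a.length : Int) - 1) 1).foldl
      (fun (s : PySem.Set Int) i =>
        if PySem.List.pyGetD a i 0 < PySem.List.pyGetD pre (i - 1) 0 ∨
           PySem.List.pyGetD a i 0 < PySem.List.pyGetD suf (i + 1) 0 then
          PySem.Set.add s (PySem.List.pyGetD a i 0)
        else s)
      PySem.Set.empty
    (picked.length : Int) + 2

-- ===== PRECONDITION & SPEC =====
-- Pre_ excludes only the empty list, on which A raises IndexError reading the first element.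
def Pre_solution (a : List Int) : Prop := a ≠ []
instance (a : List Int) : Decidable (Pre_solution a) := by unfold Pre_solution; infer_instance
def pvWitness_solution : List Int := ([3, 1, 2])
def Spec_solution (a : List Int) (out : Int) : Prop := out = solution_alt a
instance (a : List Int) (out : Int) : Decidable (Spec_solution a out) := by unfold Spec_solution; infer_instance

-- ===== CLAIM (what is proved, stated in full; the proofs are below) =====
def Claim_equal_solution : Prop := ∀ (a : List Int), Dom_solution a → Pre_solution a → Spec_solution a (solution a)


-- ===== LEMMAS AND PROOFS =====

-- running minimum of l starting from m
def mn (m : Int) (l : List Int) : Int := l.foldl min m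

-- the values a strict running minimum passes through (A's appended elements)
def hits (m : Int) : List Int → List Int
  | [] => []
  | x :: l => if x < m then x :: hits x l else hits m l

theorem mn_nil (m : Int) : mn m [] = m := rfl

theorem mn_cons (m x : Int) (l : List Int) : mn m (x :: l) = mn (min m x) l := rfl

theorem mn_append (m : Int) (l l' : List Int) : mn m (l ++ l') = mn (mn m l) l' := by
  unfold mn; rw [List.foldl_append]

theorem mn_min_comm (l : List Int) : ∀ m x : Int, mn (min m x) l = min (mn m l) x := by
  induction l with
  | nil => intro m x; rfl
  | cons y l ih =>
    intro m x
    rw [mn_cons, mn_cons]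
    rw [show min (min m x) y = min (min m y) x by rw [min_assoc, min_comm x y, ← min_assoc]]
    exact ih (min m y) x

theorem mn_reverse (l : List Int) : ∀ m : Int, mn m l.reverse = mn m l := by
  induction l with
  | nil => intro m; rfl
  | cons x l ih =>
    intro m
    rw [List.reverse_cons, mn_append, ih, mn_cons]
    show min (mn m l) x = mn (min m x) l
    rw [mn_min_comm]

theorem foldl_stepA (l : List Int) : ∀ (m : Int) (acc : List Int),
    l.foldl (fun (st : Int × List Int) x => if st.1 > x then (x, st.2 ++ [x]) else st) (m, acc)
      = (mn m l, acc ++ hits m l) := by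
  induction l with
  | nil => intro m acc; simp [mn, hits]
  | cons x l ih =>
    intro m acc
    rw [List.foldl_cons]
    by_cases h : x < m
    · rw [if_pos h, ih, mn_cons, min_eq_right h.le]
      simp [hits, h]
    · rw [if_neg h, ih, mn_cons, min_eq_left (not_lt.mp h)]
      simp [hits, h]

theorem mem_hits (v : Int) : ∀ (l : List Int) (m : Int),
    (v ∈ hits m l ↔ ∃ (k : Nat) (h : k < l.length), l[k] = v ∧ l[k] < mn m (l.take k)) := by
  intro l
  induction l with
  | nil => intro m; simp [hits]
  | cons x l ih =>
    intro m
    by_cases h : x < m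
    · rw [show hits m (x :: l) = x :: hits x l from by simp [hits, h]]
      simp only [List.mem_cons, ih]
      constructor
      · rintro (rfl | ⟨k, hk, hv, hlt⟩)
        · exact ⟨0, by simp, by simp, by simpa [mn_nil] using h⟩
        · exact ⟨k + 1, by simpa using Nat.succ_lt_succ hk, by simpa using hv, by
            simpa [List.take_succ_cons, mn_cons, min_eq_right h.le] using hlt⟩
      · rintro ⟨k, hk, hv, hlt⟩
        cases k with
        | zero => left; simpa using hv.symm
        | succ k =>
          right
          refine ⟨k, Nat.lt_of_succ_lt_succ hk, by simpa using hv, ?_⟩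
          simpa [List.take_succ_cons, mn_cons, min_eq_right h.le] using hlt
    · rw [show hits m (x :: l) = hits m l from by simp [hits, h]]
      rw [ih]
      constructor
      · rintro ⟨k, hk, hv, hlt⟩
        exact ⟨k + 1, by simpa using Nat.succ_lt_succ hk, by simpa using hv, by
          simpa [List.take_succ_cons, mn_cons, min_eq_left (not_lt.mp h)] using hlt⟩
      · rintro ⟨k, hk, hv, hlt⟩
        cases k with
        | zero => exact absurd (by simpa [mn_nil] using hlt) h
        | succ k =>
          exact ⟨k, Nat.lt_of_succ_lt_succ hk, by simpa using hv, by
            simpa [List.take_succ_cons, mn_cons, min_eq_left (not_lt.mp h)] using hlt⟩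

theorem getElem_scanl_min : ∀ (l : List Int) (m : Int) (k : Nat)
    (h : k < (List.scanl min m l).length),
    (List.scanl min m l)[k] = mn m (l.take k) := by
  intro l
  induction l with
  | nil =>
    intro m k h
    simp [List.scanl] at h
    subst h
    simp [List.scanl, mn_nil]
  | cons x l ih =>
    intro m k h
    cases k with
    | zero => simp [List.scanl, mn_nil]
    | succ k =>
      have h' : k < (List.scanl min (min m x) l).length := by
        simp [List.length_scanl] at h ⊢; omega
      calc (List.scanl min m (x :: l))[k + 1] = (List.scanl min (min m x) l)[k]'h' := by
            simp [List.scanl]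
        _ = mn (min m x) (l.take k) := ih (min m x) k h'
        _ = mn m ((x :: l).take (k + 1)) := by rw [List.take_succ_cons, mn_cons]

-- B's array-building loop is scanl min
theorem build_scan (l : List Int) : ∀ (p : List Int) (hp : p ≠ []),
    l.foldl (fun p x => p ++ [min (PySem.List.pyGetD p (-1) 0) x]) p
      = p.dropLast ++ List.scanl min (p.getLast hp) l := by
  induction l with
  | nil =>
    intro p hp
    simp [List.scanl]
    exact (List.dropLast_append_getLast hp).symm
  | cons x l ih =>
    intro p hp
    rw [List.foldl_cons, PySem.List.pyGetD_neg_one p 0 hp]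
    rw [ih (p ++ [min (p.getLast hp) x]) (by simp)]
    rw [List.dropLast_concat]
    rw [show (p ++ [min (p.getLast hp) x]).getLast (by simp) = min (p.getLast hp) x
      from List.getLast_concat]
    rw [List.scanl_cons, List.append_cons, List.dropLast_append_getLast hp]

-- membership in B's set-building fold
theorem mem_foldl_add (f : Int → Int) (C : Int → Prop) [DecidablePred C] (v : Int) :
    ∀ (l : List Int) (s0 : PySem.Set Int),
    (v ∈ l.foldl (fun s i => if C i then PySem.Set.add s (f i) else s) s0 ↔
      v ∈ s0 ∨ ∃ i ∈ l, C i ∧ f i = v) := by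
  intro l
  induction l with
  | nil => intro s0; simp
  | cons x l ih =>
    intro s0
    rw [List.foldl_cons]
    by_cases h : C x
    · rw [if_pos h, ih, PySem.Set.mem_add]
      constructor
      · rintro ((hs | rfl) | ⟨i, hi, hc, hv⟩)
        · exact Or.inl hs
        · exact Or.inr ⟨x, List.mem_cons_self, h, rfl⟩
        · exact Or.inr ⟨i, List.mem_cons_of_mem _ hi, hc, hv⟩
      · rintro (hs | ⟨i, hi, hc, hv⟩)
        · exact Or.inl (Or.inl hs)
        · rcases List.mem_cons.mp hi with rfl | hi
          · exact Or.inl (Or.inr hv.symm)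
          · exact Or.inr ⟨i, hi, hc, hv⟩
    · rw [if_neg h, ih]
      constructor
      · rintro (hs | ⟨i, hi, hc, hv⟩)
        · exact Or.inl hs
        · exact Or.inr ⟨i, List.mem_cons_of_mem _ hi, hc, hv⟩
      · rintro (hs | ⟨i, hi, hc, hv⟩)
        · exact Or.inl hs
        · rcases List.mem_cons.mp hi with rfl | hi
          · exact absurd hc h
          · exact Or.inr ⟨i, hi, hc, hv⟩

theorem nodup_foldl_add (f : Int → Int) (C : Int → Prop) [DecidablePred C] :
    ∀ (l : List Int) (s0 : PySem.Set Int), s0.Nodup →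
    (l.foldl (fun s i => if C i then PySem.Set.add s (f i) else s) s0).Nodup := by
  intro l
  induction l with
  | nil => intro s0 h; exact h
  | cons x l ih =>
    intro s0 h
    rw [List.foldl_cons]
    by_cases hc : C x
    · rw [if_pos hc]; exact ih _ (PySem.Set.nodup_add s0 (f x) h)
    · rw [if_neg hc]; exact ih _ h

-- reindex the reversed interior scan
theorem hits_reverse_iff (I : List Int) (m v : Int) :
    (v ∈ hits m I.reverse ↔
      ∃ (j : Nat) (h : j < I.length), I[j] = v ∧ I[j] < mn m (I.drop (j + 1))) := by
  rw [mem_hits]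
  constructor
  · rintro ⟨k, hk, hv, hlt⟩
    have hkL : k < I.length := by simpa using hk
    refine ⟨I.length - 1 - k, by omega, ?_, ?_⟩
    · rw [List.getElem_reverse] at hv; exact hv
    · rw [List.getElem_reverse] at hlt
      rw [List.take_reverse, mn_reverse] at hlt
      have harith : I.length - k = I.length - 1 - k + 1 := by omega
      rw [harith] at hlt
      exact hlt
  · rintro ⟨j, hj, hv, hlt⟩
    refine ⟨I.length - 1 - j, by simpa using (by omega : I.length - 1 - j < I.length), ?_, ?_⟩
    · rw [List.getElem_reverse]
      have : I.length - 1 - (I.length - 1 - j) = j := by omega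
      simp only [this]
      exact hv
    · rw [List.getElem_reverse, List.take_reverse, mn_reverse]
      have h1 : I.length - 1 - (I.length - 1 - j) = j := by omega
      have h2 : I.length - (I.length - 1 - j) = j + 1 := by omega
      simp only [h1, h2]
      exact hlt


theorem solA_shape (a : List Int) (h2 : 2 ≤ a.length) :
    solution a = ((PySem.Set.ofList
        (hits (PySem.List.pyGetD a 0 0) (a.dropLast.drop 1)
          ++ hits (PySem.List.pyGetD a (-1) 0) (a.dropLast.drop 1).reverse)).length : Int) + 2 := by
  have hdl : ((a.dropLast.length : Nat) : Int) = (a.length : Int) - 1 := by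
    simp [List.length_dropLast]; omega
  have e1 : List.foldl (fun (st : Int × List Int) i =>
        if st.1 > PySem.List.pyGetD a i 0 then
          (PySem.List.pyGetD a i 0, st.2 ++ [PySem.List.pyGetD a i 0]) else st)
      (PySem.List.pyGetD a 0 0, []) (PySem.List.pyRange 1 ((a.length : Int) - 1) 1)
      = (mn (PySem.List.pyGetD a 0 0) (a.dropLast.drop 1),
         hits (PySem.List.pyGetD a 0 0) (a.dropLast.drop 1)) := by
    rw [← hdl]
    rw [PySem.List.foldl_congr_mem _ _ (fun (st : Int × List Int) i =>
        if st.1 > PySem.List.pyGetD a.dropLast i 0 then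
          (PySem.List.pyGetD a.dropLast i 0, st.2 ++ [PySem.List.pyGetD a.dropLast i 0]) else st)
        _ ?_]
    · exact (PySem.List.foldl_pyRange_pyGetD' a.dropLast 0
        (fun st x => if st.1 > x then (x, st.2 ++ [x]) else st) _ (by norm_num)).trans
        (foldl_stepA _ _ _)
    · intro st i hi
      rw [PySem.List.mem_pyRange_one] at hi
      obtain ⟨hi1, hi2⟩ := hi
      have h0 : (0:Int) ≤ i := by omega
      have hlt : i < (a.length : Int) := by omega
      simp only [PySem.List.pyGetD_eq_getElem a 0 h0 hlt,
          PySem.List.pyGetD_eq_getElem a.dropLast 0 h0 hi2,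
          List.getElem_dropLast]
  have e2 : ∀ s1 : List Int, List.foldl (fun (st : Int × List Int) i =>
        if st.1 > PySem.List.pyGetD a i 0 then
          (PySem.List.pyGetD a i 0, st.2 ++ [PySem.List.pyGetD a i 0]) else st)
      (PySem.List.pyGetD a (-1) 0, s1) (PySem.List.pyRange ((a.length : Int) - 2) 0 (-1))
      = (mn (PySem.List.pyGetD a (-1) 0) (a.dropLast.drop 1).reverse,
         s1 ++ hits (PySem.List.pyGetD a (-1) 0) (a.dropLast.drop 1).reverse) := by
    intro s1
    rw [PySem.List.pyRange_neg_one_eq_reverse]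
    rw [show (0:Int) + 1 = 1 from by norm_num,
        show (a.length : Int) - 2 + 1 = ((a.dropLast.length : Nat) : Int) from by rw [hdl]; ring]
    rw [PySem.List.foldl_congr_mem _ _ (fun (st : Int × List Int) i =>
        if st.1 > PySem.List.pyGetD a.dropLast i 0 then
          (PySem.List.pyGetD a.dropLast i 0, st.2 ++ [PySem.List.pyGetD a.dropLast i 0]) else st)
        _ ?_]
    · refine (List.foldl_map (f := fun j => PySem.List.pyGetD a.dropLast j 0)
        (g := fun (st : Int × List Int) x =>
          if st.1 > x then (x, st.2 ++ [x]) else st)).symm.trans ?_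
      rw [List.map_reverse, PySem.List.map_pyGetD_pyRange' a.dropLast 0 (by norm_num)]
      exact foldl_stepA _ _ _
    · intro st i hi
      rw [List.mem_reverse, PySem.List.mem_pyRange_one] at hi
      obtain ⟨hi1, hi2⟩ := hi
      have h0 : (0:Int) ≤ i := by omega
      have hlt : i < (a.length : Int) := by omega
      simp only [PySem.List.pyGetD_eq_getElem a 0 h0 hlt,
          PySem.List.pyGetD_eq_getElem a.dropLast 0 h0 hi2,
          List.getElem_dropLast]
  have hne : ¬ ((a.length == 1) = true) := by simp; omega
  unfold solution
  rw [if_neg hne]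
  dsimp only
  rw [e1]
  dsimp only
  rw [e2]

-- B's normalized arrays: prefix minima and suffix minima
def preN (a : List Int) : List Int := List.scanl min (PySem.List.pyGetD a 0 0) (a.drop 1)

def sufN (a : List Int) : List Int :=
  (List.scanl min (PySem.List.pyGetD a (-1) 0) a.dropLast.reverse).reverse

theorem solB_shape (a : List Int) (h2 : 2 ≤ a.length) :
    solution_alt a = ((List.foldl (fun (s : PySem.Set Int) i =>
        if PySem.List.pyGetD a i 0 < PySem.List.pyGetD (preN a) (i - 1) 0 ∨
           PySem.List.pyGetD a i 0 < PySem.List.pyGetD (sufN a) (i + 1) 0 then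
          PySem.Set.add s (PySem.List.pyGetD a i 0) else s)
      PySem.Set.empty (PySem.List.pyRange 1 ((a.length : Int) - 1) 1)).length : Int) + 2 := by
  have hne : ¬ ((a.length == 1) = true) := by simp; omega
  have hpre : (PySem.List.slice a (some 1) none).foldl
      (fun p x => p ++ [min (PySem.List.pyGetD p (-1) 0) x]) [PySem.List.pyGetD a 0 0]
      = preN a := by
    rw [PySem.List.slice_from_one, build_scan a.tail [PySem.List.pyGetD a 0 0] (by simp)]
    simp [preN, List.drop_one]
  have hsuf : ((PySem.List.slice a none (some (-1))).reverse.foldl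
      (fun p x => p ++ [min (PySem.List.pyGetD p (-1) 0) x]) [PySem.List.pyGetD a (-1) 0]).reverse
      = sufN a := by
    rw [PySem.List.slice_to_neg_one,
        build_scan a.dropLast.reverse [PySem.List.pyGetD a (-1) 0] (by simp)]
    simp [sufN]
  unfold solution_alt
  rw [if_neg hne]
  dsimp only
  rw [hpre, hsuf]

theorem interior_length (a : List Int) : (a.dropLast.drop 1).length = a.length - 2 := by
  simp [List.length_dropLast]
  omega

theorem interior_get (a : List Int) (j : Nat) (h : j < (a.dropLast.drop 1).length) :
    (a.dropLast.drop 1)[j] = a[j + 1]'(by have := interior_length a; omega) := by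
  simp only [List.getElem_drop, List.getElem_dropLast]
  congr 1
  omega

theorem bridge_val (a : List Int) (h2 : 2 ≤ a.length) (j : Nat) (hj : j < a.length - 2) :
    PySem.List.pyGetD a ((j : Int) + 1) 0
      = (a.dropLast.drop 1)[j]'(by rw [interior_length]; omega) := by
  have hb : ((j : Int) + 1) < (a.length : Int) := by omega
  rw [PySem.List.pyGetD_eq_getElem a 0 (by omega) hb, interior_get]
  have : ((j : Int) + 1).toNat = j + 1 := by omega
  simp only [this]

theorem bridge_pre (a : List Int) (h2 : 2 ≤ a.length) (j : Nat) (hj : j < a.length - 2) :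
    PySem.List.pyGetD (preN a) (j : Int) 0
      = mn (PySem.List.pyGetD a 0 0) ((a.dropLast.drop 1).take j) := by
  have hlen : (preN a).length = a.length := by
    simp [preN, List.length_scanl]
    omega
  rw [PySem.List.pyGetD_eq_getElem _ 0 (by omega) (by rw [hlen]; omega)]
  have ht : ((j : Int)).toNat = j := by omega
  simp only [ht]
  unfold preN
  rw [getElem_scanl_min]
  congr 1
  rw [List.dropLast_eq_take, List.drop_take, List.take_take]
  rw [show min j (a.length - 1 - 1) = j from by omega]

theorem bridge_suf (a : List Int) (h2 : 2 ≤ a.length) (j : Nat) (hj : j < a.length - 2) :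
    PySem.List.pyGetD (sufN a) ((j : Int) + 2) 0
      = mn (PySem.List.pyGetD a (-1) 0) ((a.dropLast.drop 1).drop (j + 1)) := by
  have hslen : (sufN a).length = a.length := by
    simp [sufN, List.length_dropLast]
    omega
  rw [PySem.List.pyGetD_eq_getElem _ 0 (by omega) (by rw [hslen]; omega)]
  have ht : ((j : Int) + 2).toNat = j + 2 := by omega
  simp only [ht]
  unfold sufN
  rw [List.getElem_reverse, getElem_scanl_min, List.take_reverse, mn_reverse]
  congr 1
  rw [List.drop_drop]
  congr 1
  simp [List.length_dropLast]
  omega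

theorem main_count (a : List Int) (h2 : 2 ≤ a.length) :
    (PySem.Set.ofList (hits (PySem.List.pyGetD a 0 0) (a.dropLast.drop 1)
        ++ hits (PySem.List.pyGetD a (-1) 0) (a.dropLast.drop 1).reverse)).length
      = (List.foldl (fun (s : PySem.Set Int) i =>
          if PySem.List.pyGetD a i 0 < PySem.List.pyGetD (preN a) (i - 1) 0 ∨
             PySem.List.pyGetD a i 0 < PySem.List.pyGetD (sufN a) (i + 1) 0 then
            PySem.Set.add s (PySem.List.pyGetD a i 0) else s)
        PySem.Set.empty (PySem.List.pyRange 1 ((a.length : Int) - 1) 1)).length := by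
  have hIlen := interior_length a
  apply List.Perm.length_eq
  apply (List.perm_ext_iff_of_nodup (PySem.Set.nodup_ofList _)
    (nodup_foldl_add (fun i => PySem.List.pyGetD a i 0)
      (fun i => PySem.List.pyGetD a i 0 < PySem.List.pyGetD (preN a) (i - 1) 0 ∨
        PySem.List.pyGetD a i 0 < PySem.List.pyGetD (sufN a) (i + 1) 0)
      _ _ List.nodup_nil)).mpr
  intro v
  rw [PySem.Set.mem_ofList, List.mem_append, mem_hits, hits_reverse_iff]
  simp only [mem_foldl_add (fun i => PySem.List.pyGetD a i 0)
      (fun i => PySem.List.pyGetD a i 0 < PySem.List.pyGetD (preN a) (i - 1) 0 ∨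
        PySem.List.pyGetD a i 0 < PySem.List.pyGetD (sufN a) (i + 1) 0)]
  simp only [List.not_mem_nil, false_or]
  constructor
  · rintro (⟨k, hk, hv, hlt⟩ | ⟨k, hk, hv, hlt⟩)
    · refine ⟨(k : Int) + 1, ?_, ?_, ?_⟩
      · rw [PySem.List.mem_pyRange_one]; omega
      · rw [show ((k : Int) + 1 - 1) = (k : Int) from by ring,
            bridge_pre a h2 k (by omega), bridge_val a h2 k (by omega)]
        exact Or.inl hlt
      · rw [bridge_val a h2 k (by omega)]; exact hv
    · refine ⟨(k : Int) + 1, ?_, ?_, ?_⟩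
      · rw [PySem.List.mem_pyRange_one]; omega
      · rw [show ((k : Int) + 1 + 1) = (k : Int) + 2 from by ring,
            bridge_suf a h2 k (by omega), bridge_val a h2 k (by omega)]
        exact Or.inr hlt
      · rw [bridge_val a h2 k (by omega)]; exact hv
  · rintro ⟨i, hmem, hcond, hval⟩
    rw [PySem.List.mem_pyRange_one] at hmem
    have hij : i = ((i - 1).toNat : Int) + 1 := by omega
    have hj : (i - 1).toNat < a.length - 2 := by omega
    rw [hij] at hcond hval
    rw [show (((i - 1).toNat : Int) + 1 - 1) = ((i - 1).toNat : Int) from by ring,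
        show (((i - 1).toNat : Int) + 1 + 1) = ((i - 1).toNat : Int) + 2 from by ring,
        bridge_pre a h2 _ hj, bridge_suf a h2 _ hj, bridge_val a h2 _ hj] at hcond
    rw [bridge_val a h2 _ hj] at hval
    rcases hcond with hc | hc
    · exact Or.inl ⟨(i - 1).toNat, by omega, hval, hc⟩
    · exact Or.inr ⟨(i - 1).toNat, by omega, hval, hc⟩

theorem main_eq (a : List Int) (ha : a ≠ []) : solution a = solution_alt a := by
  by_cases h1 : a.length = 1
  · simp [solution, solution_alt, h1]
  · have h2 : 2 ≤ a.length := by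
      have : a.length ≠ 0 := by simpa using ha
      omega
    rw [solA_shape a h2, solB_shape a h2, main_count a h2]

-- ===== VERDICT (by name: the statement is the Claim_ definition above) =====
theorem solution_spec : Claim_equal_solution := by
  intro a _ hpre
  unfold Spec_solution
  exact main_eq a hpre
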